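-- pv_equiv track=rewrite | github.com/victorlee079/leetcode | dp/MinimumTimetoMakeRopeColorful.py | minCostSpaceOpt
-- ===== SOURCE A (Python) =====
-- from typing import List
--
-- def minCostSpaceOpt(colors: str, neededTime: List[int]) -> int:
--     n = len(colors)
--     res, maxTime = 0, neededTime[0]
--
--     for i in range(1, n):
--         if colors[i] == colors[i-1]:
--             if neededTime[i] <= maxTime:
--                 res += neededTime[i]
--             else:
--                 res += maxTime
--                 maxTime = neededTime[i]
--         else:
--             maxTime = neededTime[i]
--
--     return res
-- ===== SOURCE B (Python) =====
-- from typing import List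
--
-- def minCostSpaceOpt(colors: str, neededTime: List[int]) -> int:
--     # Group-then-reduce: split into maximal runs of equal colors;
--     # each run costs (sum of its times) - (max of its times).
--     pairs = list(zip(colors, neededTime))
--     res = 0
--     k = 0
--     while k < len(pairs):
--         c = pairs[k][0]
--         s = 0
--         m = pairs[k][1]
--         while k < len(pairs) and pairs[k][0] == c:
--             s += pairs[k][1]
--             m = max(m, pairs[k][1])
--             k += 1
--         res += s - m
--     return res
-- ===== Notes on version B (the rewrite author's own statement) =====
-- stated objective: alternative
-- what changed: Replaces A's single pass with a running max and conditional adds by an explicit group-then-reduce: an outer loop over maximal runs of equal colors with an inner loop computing each run's sum and max, adding sum - max per run.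
import Mathlib
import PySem

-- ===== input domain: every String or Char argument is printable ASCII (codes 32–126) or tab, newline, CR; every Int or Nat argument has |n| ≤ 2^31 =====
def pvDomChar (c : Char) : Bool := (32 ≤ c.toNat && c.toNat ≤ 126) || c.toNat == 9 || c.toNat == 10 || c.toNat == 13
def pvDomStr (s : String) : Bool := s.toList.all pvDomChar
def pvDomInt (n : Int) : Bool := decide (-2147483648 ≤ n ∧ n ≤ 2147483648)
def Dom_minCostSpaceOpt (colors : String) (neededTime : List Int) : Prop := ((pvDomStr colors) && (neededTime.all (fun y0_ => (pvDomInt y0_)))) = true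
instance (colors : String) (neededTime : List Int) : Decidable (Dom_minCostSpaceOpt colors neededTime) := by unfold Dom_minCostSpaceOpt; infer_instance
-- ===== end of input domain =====

-- B replaces A's running-max single pass by a group-then-reduce over maximal equal-color runs
-- (sum - max per run); same O(n) cost, different decomposition.

-- ===== PORT A =====
-- literal transliteration: res, maxTime = 0, neededTime[0]; for i in range(1, n): …
def minCostSpaceOpt (colors : String) (neededTime : List Int) : Int :=
  let cs := colors.toList
  let n : Int := cs.length
  let st := (PySem.List.pyRange 1 n 1).foldl (fun (st : Int × Int) i =>
      if PySem.List.pyGetD cs i ' ' = PySem.List.pyGetD cs (i - 1) ' ' then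
        if PySem.List.pyGetD neededTime i 0 ≤ st.2 then
          (st.1 + PySem.List.pyGetD neededTime i 0, st.2)
        else
          (st.1 + st.2, PySem.List.pyGetD neededTime i 0)
      else
        (st.1, PySem.List.pyGetD neededTime i 0))
    (0, PySem.List.pyGetD neededTime 0 0)
  st.1

-- ===== PORT B =====
-- inner while loop of Source B: consume the current run, accumulating sum s and max m
def grabRun (c : Char) : List (Char × Int) → Int → Int → Int × Int × List (Char × Int)
  | [], s, m => (s, m, [])
  | (c', t) :: rest, s, m =>
      if c' = c then grabRun c rest (s + t) (max m t) else (s, m, (c', t) :: rest)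

theorem grabRun_length_le (c : Char) : ∀ (l : List (Char × Int)) (s m : Int),
    (grabRun c l s m).2.2.length ≤ l.length := by
  intro l
  induction l with
  | nil => intro s m; simp [grabRun]
  | cons p rest ih =>
      intro s m
      obtain ⟨c', t⟩ := p
      by_cases h : c' = c
      · simpa [grabRun, h] using Nat.le_succ_of_le (ih (s + t) (max m t))
      · simp [grabRun, h]

-- outer while loop of Source B: one step per maximal run, adding s - m
def runsB : List (Char × Int) → Int
  | [] => 0
  | (c, t) :: l =>
      let g := grabRun c l t t
      (g.1 - g.2.1) + runsB g.2.2
termination_by l => l.length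
decreasing_by
  simpa using Nat.lt_succ_of_le (grabRun_length_le c l t t)

def minCostSpaceOpt_alt (colors : String) (neededTime : List Int) : Int :=
  runsB (colors.toList.zip neededTime)

-- ===== PRECONDITION & SPEC =====
-- exactly where A returns: neededTime[0] exists and every index i < len(colors) is in range of neededTime
def Pre_minCostSpaceOpt (colors : String) (neededTime : List Int) : Prop :=
  neededTime ≠ [] ∧ colors.toList.length ≤ neededTime.length
instance (colors : String) (neededTime : List Int) : Decidable (Pre_minCostSpaceOpt colors neededTime) := by
  unfold Pre_minCostSpaceOpt; infer_instance
def pvWitness_minCostSpaceOpt : String × List Int := ("aab", [1, 2, 3])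

def Spec_minCostSpaceOpt (colors : String) (neededTime : List Int) (out : Int) : Prop :=
  out = minCostSpaceOpt_alt colors neededTime
instance (colors : String) (neededTime : List Int) (out : Int) : Decidable (Spec_minCostSpaceOpt colors neededTime out) := by
  unfold Spec_minCostSpaceOpt; infer_instance

-- ===== CLAIM (what is proved, stated in full; the proofs are below) =====
def Claim_equal_minCostSpaceOpt : Prop := ∀ (colors : String) (neededTime : List Int), Dom_minCostSpaceOpt colors neededTime → Pre_minCostSpaceOpt colors neededTime → Spec_minCostSpaceOpt colors neededTime (minCostSpaceOpt colors neededTime)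

-- ===== LEMMAS AND PROOFS =====

-- A's loop rephrased structurally over (color, time) pairs with the previous color threaded
def goA : List (Char × Int) → Char → Int → Int → Int
  | [], _, _, res => res
  | (c, t) :: l, prev, m, res =>
      if c = prev then
        (if t ≤ m then goA l c m (res + t) else goA l c t (res + m))
      else goA l c t res

theorem goA_add : ∀ (l : List (Char × Int)) (c : Char) (m r : Int),
    goA l c m r = r + goA l c m 0 := by
  intro l
  induction l with
  | nil => intro c m r; simp [goA]
  | cons p rest ih =>
      intro c m r
      obtain ⟨c', t⟩ := p
      by_cases h : c' = c
      · subst h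
        by_cases ht : t ≤ m
        · simp only [goA, ite_true, if_pos ht]
          rw [ih c' m (r + t), ih c' m (0 + t)]; ring
        · simp only [goA, ite_true, if_neg ht]
          rw [ih c' t (r + m), ih c' t (0 + m)]; ring
      · simp only [goA, if_neg h]
        rw [ih c' t r, ih c' t 0]

-- A's pass over one run equals that run's (sum - max) plus A's pass on the rest
theorem goA_eq_grab : ∀ (l : List (Char × Int)) (c : Char) (s m : Int),
    ((grabRun c l s m).1 - (grabRun c l s m).2.1) + runsB (grabRun c l s m).2.2
      = goA l c m (s - m) := by
  intro l
  induction l with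
  | nil => intro c s m; simp [grabRun, goA, runsB]
  | cons p rest ih =>
      intro c s m
      obtain ⟨c', t⟩ := p
      by_cases h : c' = c
      · subst h
        by_cases ht : t ≤ m
        · have hmax : max m t = m := max_eq_left ht
          simp only [grabRun, ite_true, goA, if_pos ht, hmax]
          have := ih c' (s + t) m
          calc ((grabRun c' rest (s + t) m).1 - (grabRun c' rest (s + t) m).2.1)
                  + runsB (grabRun c' rest (s + t) m).2.2
              = goA rest c' m (s + t - m) := ih c' (s + t) m
            _ = goA rest c' m (s - m + t) := by ring_nf
        · have hmax : max m t = t := max_eq_right (le_of_lt (lt_of_not_ge ht))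
          simp only [grabRun, ite_true, goA, if_neg ht, hmax]
          calc ((grabRun c' rest (s + t) t).1 - (grabRun c' rest (s + t) t).2.1)
                  + runsB (grabRun c' rest (s + t) t).2.2
              = goA rest c' t (s + t - t) := ih c' (s + t) t
            _ = goA rest c' t s := by ring_nf
            _ = goA rest c' t (s - m + m) := by ring_nf
      · have hruns : runsB ((c', t) :: rest) = goA rest c' t 0 := by
          have := ih c' t t
          simpa [runsB] using this
        simp only [grabRun, goA, if_neg h]
        rw [hruns, goA_add rest c' t (s - m)]

theorem runsB_cons_eq_goA (c : Char) (t : Int) (l : List (Char × Int)) :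
    runsB ((c, t) :: l) = goA l c t 0 := by
  have h := goA_eq_grab l c t t
  simpa [runsB] using h

-- bridge: A's indexed foldl from index k equals goA on the zipped suffix
theorem foldA_eq_goA (cs : List Char) (ts : List Int) (hlen : cs.length ≤ ts.length) :
    ∀ (d : Nat) (k : Nat), k = cs.length - d → 1 ≤ k → ∀ (res m : Int),
    ((PySem.List.pyRange (k : Int) (cs.length : Int) 1).foldl (fun (st : Int × Int) i =>
      if PySem.List.pyGetD cs i ' ' = PySem.List.pyGetD cs (i - 1) ' ' then
        if PySem.List.pyGetD ts i 0 ≤ st.2 then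
          (st.1 + PySem.List.pyGetD ts i 0, st.2)
        else
          (st.1 + st.2, PySem.List.pyGetD ts i 0)
      else
        (st.1, PySem.List.pyGetD ts i 0)) (res, m)).1
      = goA ((cs.drop k).zip (ts.drop k)) (cs.getD (k - 1) ' ') m res := by
  intro d
  induction d with
  | zero =>
      intro k hk h1 res m
      have hk' : (cs.length : Int) ≤ (k : Int) := by omega
      rw [PySem.List.pyRange_one_eq_nil hk']
      have : cs.length ≤ k := by omega
      simp [List.drop_eq_nil_of_le this, goA]
  | succ d ih =>
      intro k hk h1 res m
      by_cases hlt : k < cs.length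
      · have hlt' : ((k : Int)) < (cs.length : Int) := by exact_mod_cast hlt
        rw [PySem.List.pyRange_one_cons hlt']
        simp only [List.foldl_cons]
        have hk1 : ((k : Int)) - 1 = ((k - 1 : Nat) : Int) := by omega
        have hcsk : PySem.List.pyGetD cs (k : Int) ' ' = cs.getD k ' ' := by
          simp [PySem.List.pyGetD_natCast]
        have hcsk1 : PySem.List.pyGetD cs ((k : Int) - 1) ' ' = cs.getD (k - 1) ' ' := by
          rw [hk1]; simp [PySem.List.pyGetD_natCast]
        have htk : PySem.List.pyGetD ts (k : Int) 0 = ts.getD k 0 := by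
          simp [PySem.List.pyGetD_natCast]
        have hkts : k < ts.length := lt_of_lt_of_le hlt hlen
        have hgc : cs.getD k ' ' = cs[k] := List.getD_eq_getElem cs ' ' hlt
        have hgt : ts.getD k 0 = ts[k] := List.getD_eq_getElem ts 0 hkts
        have hdrop : (cs.drop k).zip (ts.drop k)
            = (cs.getD k ' ', ts.getD k 0) :: ((cs.drop (k+1)).zip (ts.drop (k+1))) := by
          rw [List.drop_eq_getElem_cons hlt, List.drop_eq_getElem_cons hkts,
              List.zip_cons_cons, hgc, hgt]
        have hk2 : ((k : Int)) + 1 = ((k + 1 : Nat) : Int) := by omega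
        have ihk := ih (k + 1) (by omega) (by omega)
        rw [hcsk, hcsk1, htk, hdrop]
        by_cases hc : cs.getD k ' ' = cs.getD (k - 1) ' '
        · by_cases htm : ts.getD k 0 ≤ m
          · simp only [if_pos hc, if_pos htm, hk2]
            rw [ihk (res + ts.getD k 0) m]
            simp only [goA, if_pos hc, if_pos htm, Nat.add_sub_cancel]
          · simp only [if_pos hc, if_neg htm, hk2]
            rw [ihk (res + m) (ts.getD k 0)]
            simp only [goA, if_pos hc, if_neg htm, Nat.add_sub_cancel]
        · simp only [if_neg hc, hk2]
          rw [ihk res (ts.getD k 0)]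
          simp only [goA, if_neg hc, Nat.add_sub_cancel]
      · have hk' : (cs.length : Int) ≤ (k : Int) := by omega
        rw [PySem.List.pyRange_one_eq_nil hk']
        have : cs.length ≤ k := by omega
        simp [List.drop_eq_nil_of_le this, goA]

-- ===== VERDICT (by name: the statement is the Claim_ definition above) =====
theorem minCostSpaceOpt_spec : Claim_equal_minCostSpaceOpt := by
  unfold Claim_equal_minCostSpaceOpt
  intro colors neededTime _ hpre
  obtain ⟨hne, hlen⟩ := hpre
  unfold Spec_minCostSpaceOpt minCostSpaceOpt minCostSpaceOpt_alt
  cases hcs : colors.toList with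
  | nil =>
      simp only
      rw [show ((List.length ([] : List Char)) : Int) = 0 by simp,
          PySem.List.pyRange_one_eq_nil (by norm_num)]
      simp [runsB]
  | cons c0 cs' =>
      cases ts' : neededTime with
      | nil => exact absurd ts' hne
      | cons t0 ts0 =>
          simp only
          have hlen' : (c0 :: cs').length ≤ (t0 :: ts0).length := by
            rw [← hcs, ← ts']; exact hlen
          have hb := foldA_eq_goA (c0 :: cs') (t0 :: ts0) hlen'
            ((c0 :: cs').length - 1) 1 (by simp) (le_refl 1) 0 t0
          rw [show ((1 : Nat) : Int) = (1 : Int) from rfl] at hb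
          rw [PySem.List.pyGetD_zero_cons, hb, List.zip_cons_cons, runsB_cons_eq_goA]
          simp [List.getD]
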